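-- pv_equiv track=rewrite | github.com/AffableMelon/Gazzi | src/core/post_processor.py | _merge_hyphenated
-- ===== SOURCE A (Python) =====
-- def _merge_hyphenated(lines: list) -> list:
--     """Merge lines where a word was broken with a hyphen at line end."""
--     if not lines:
--         return lines
--
--     merged = [lines[0]]
--     for i in range(1, len(lines)):
--         if merged[-1].endswith('-') and lines[i] and lines[i][0].islower():
--             # Remove hyphen and join with next line
--             merged[-1] = merged[-1][:-1] + lines[i]
--         else:
--             merged.append(lines[i])
--     return merged
-- ===== SOURCE B (Python) =====
-- def _merge_hyphenated(lines: list) -> list: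
--     """Merge lines where a word was broken with a hyphen at line end.
--
--     Two-pass version: first group consecutive lines that glue together
--     (previous original line ends with '-', current line starts lowercase),
--     then collapse each group with a left fold doing a[:-1] + b.
--     """
--     if not lines:
--         return lines
--
--     groups = [[lines[0]]]
--     for prev, cur in zip(lines, lines[1:]):
--         if prev.endswith('-') and cur and cur[0].islower():
--             groups[-1].append(cur)
--         else:
--             groups.append([cur])
--
--     out = []
--     for g in groups:
--         acc = g[0]
--         for s in g[1:]:
--             acc = acc[:-1] + s
--         out.append(acc)
--     return out
-- ===== Notes on version B (the rewrite author's own statement) =====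
-- stated objective: alternative
-- what changed: A's single loop that mutates merged[-1] in place is re-decomposed into two passes: a grouping pass over adjacent original lines (glue iff prev ends with '-' and cur starts lowercase) followed by a per-group left fold a[:-1]+b; correctness rests on the proved invariant that merged[-1] ends with '-' iff the previous original line does.
import Mathlib
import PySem

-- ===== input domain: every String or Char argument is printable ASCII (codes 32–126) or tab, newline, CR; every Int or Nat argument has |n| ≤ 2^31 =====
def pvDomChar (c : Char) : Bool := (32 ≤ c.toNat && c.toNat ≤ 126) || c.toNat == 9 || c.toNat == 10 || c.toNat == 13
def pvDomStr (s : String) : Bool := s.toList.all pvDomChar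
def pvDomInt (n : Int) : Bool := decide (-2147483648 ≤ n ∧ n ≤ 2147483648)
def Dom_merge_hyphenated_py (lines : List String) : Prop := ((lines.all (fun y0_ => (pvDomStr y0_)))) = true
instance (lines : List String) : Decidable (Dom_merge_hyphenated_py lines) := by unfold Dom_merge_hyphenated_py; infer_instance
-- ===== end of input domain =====

-- B re-decomposes A's single accumulating loop into a grouping pass plus a per-group fold (objective: alternative decomposition; same cost).

-- ===== PORT A =====
-- A's loop 'for i in range(1, len(lines))' ported as the obvious structural recursion
-- over the remaining lines with the same 'merged' state; merged[-1] is pyGetD merged (-1) "",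
-- 'merged[-1] = x' is dropLast ++ [x]; lines[i][0].islower() guarded by truthiness of lines[i]
-- is the match on the character list (short-circuit 'and' made explicit).
def pvMergeLoopA (merged : List String) : List String → List String
  | [] => merged
  | cur :: rest =>
    let last := PySem.List.pyGetD merged (-1) ""
    if PySem.Str.endswith last "-" &&
        (match cur.toList with | [] => false | c :: _ => PySem.Chars.islower c) then
      pvMergeLoopA (merged.dropLast ++ [PySem.Str.slice last none (some (-1)) ++ cur]) rest
    else
      pvMergeLoopA (merged ++ [cur]) rest

def merge_hyphenated_py (lines : List String) : List String :=
  match lines with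
  | [] => []
  | h :: t => pvMergeLoopA [h] t

-- ===== PORT B =====
-- glue prev cur = prev.endswith('-') and cur and cur[0].islower()
def pvGlue (prev cur : String) : Bool :=
  PySem.Str.endswith prev "-" &&
    (match cur.toList with | [] => false | c :: _ => PySem.Chars.islower c)

-- grouping pass of Source B: current group g, previous original line prev
def pvGroups (prev : String) (g : List String) : List String → List (List String)
  | [] => [g]
  | x :: xs => if pvGlue prev x then pvGroups x (g ++ [x]) xs else g :: pvGroups x [x] xs

-- collapse of Source B: acc = g[0]; for s in g[1:]: acc = acc[:-1] + s
def pvCollapse (g : List String) : String :=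
  (g.drop 1).foldl (fun a s => PySem.Str.slice a none (some (-1)) ++ s) g.headI

def merge_hyphenated_py_alt (lines : List String) : List String :=
  match lines with
  | [] => []
  | h :: t => (pvGroups h [h] t).map pvCollapse

-- ===== PRECONDITION & SPEC =====
def Spec_merge_hyphenated_py (lines : List String) (out : List String) : Prop := out = merge_hyphenated_py_alt lines
instance (lines : List String) (out : List String) : Decidable (Spec_merge_hyphenated_py lines out) := by unfold Spec_merge_hyphenated_py; infer_instance

-- ===== CLAIM (what is proved, stated in full; the proofs are below) =====
def Claim_equal_merge_hyphenated_py : Prop := ∀ (lines : List String), Dom_merge_hyphenated_py lines → Spec_merge_hyphenated_py lines (merge_hyphenated_py lines)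

-- ===== LEMMAS AND PROOFS =====

theorem pvCollapse_singleton (s : String) : pvCollapse [s] = s := rfl

theorem pvCollapse_append_singleton (g : List String) (hg : g ≠ []) (cur : String) :
    pvCollapse (g ++ [cur]) =
      PySem.Str.slice (pvCollapse g) none (some (-1)) ++ cur := by
  cases g with
  | nil => exact absurd rfl hg
  | cons h t => simp [pvCollapse, List.foldl_append]

theorem pvSuffix_single (l : List Char) (c : Char) : ([c] <:+ l) ↔ l.getLast? = some c := by
  constructor
  · rintro ⟨t, rfl⟩; simp
  · intro h
    cases l with
    | nil => simp at h
    | cons x xs =>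
      refine ⟨(x::xs).dropLast, ?_⟩
      have h2 : (x::xs).getLast (by simp) = c := by
        rw [List.getLast_eq_iff_getLast?_eq_some]; exact h
      calc (x::xs).dropLast ++ [c]
          = (x::xs).dropLast ++ [(x::xs).getLast (by simp)] := by rw [h2]
        _ = x :: xs := List.dropLast_append_getLast _

theorem pvEndswith_dash_append (a b : String) (hb : b.toList ≠ []) :
    PySem.Str.endswith (a ++ b) "-" = PySem.Str.endswith b "-" := by
  have hd : ("-" : String).toList = ['-'] := rfl
  simp only [PySem.Str.endswith_eq, String.toList_append, hd]
  rw [Bool.eq_iff_iff, PySem.Chars.endswith_iff, PySem.Chars.endswith_iff,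
    pvSuffix_single, pvSuffix_single,
    show (a.toList ++ b.toList).getLast? = b.toList.getLast? from
      List.getLast?_append_of_ne_nil _ hb]

theorem pvMergeLoopA_cons (merged : List String) (cur : String) (rest : List String) :
    pvMergeLoopA merged (cur :: rest) =
      if (PySem.Str.endswith (PySem.List.pyGetD merged (-1) "") "-" &&
          (match cur.toList with | [] => false | c :: _ => PySem.Chars.islower c)) then
        pvMergeLoopA (merged.dropLast ++
          [PySem.Str.slice (PySem.List.pyGetD merged (-1) "") none (some (-1)) ++ cur]) rest
      else pvMergeLoopA (merged ++ [cur]) rest := rfl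

theorem pvGroups_cons (prev : String) (g : List String) (x : String) (xs : List String) :
    pvGroups prev g (x :: xs) =
      if pvGlue prev x then pvGroups x (g ++ [x]) xs else g :: pvGroups x [x] xs := rfl

theorem pvMain (prev : String) (rest : List String) (acc g : List String)
    (hg : g ≠ [])
    (hlast : PySem.Str.endswith (pvCollapse g) "-" = PySem.Str.endswith prev "-") :
    pvMergeLoopA (acc ++ [pvCollapse g]) rest = acc ++ (pvGroups prev g rest).map pvCollapse := by
  induction rest generalizing prev acc g with
  | nil => simp [pvMergeLoopA, pvGroups]
  | cons cur rest ih =>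
    have hget : PySem.List.pyGetD (acc ++ [pvCollapse g]) (-1) "" = pvCollapse g :=
      PySem.List.pyGetD_neg_one_append_singleton _ _ _
    rw [pvMergeLoopA_cons, pvGroups_cons, hget, hlast, List.dropLast_concat]
    by_cases hcond : pvGlue prev cur = true
    · have hcond' := hcond
      unfold pvGlue at hcond'
      have hbne : cur.toList ≠ [] := by
        rcases Bool.and_eq_true_iff.mp hcond' with ⟨-, h2⟩
        intro hnil; rw [hnil] at h2; exact Bool.false_ne_true h2
      rw [if_pos hcond', if_pos hcond, ← pvCollapse_append_singleton g hg cur]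
      exact ih cur acc (g ++ [cur]) (by simp) (by
        rw [pvCollapse_append_singleton g hg cur]
        exact pvEndswith_dash_append _ _ hbne)
    · have hcond' : ¬ (PySem.Str.endswith prev "-" &&
          (match cur.toList with | [] => false | c :: _ => PySem.Chars.islower c)) = true := by
        unfold pvGlue at hcond; exact hcond
      rw [if_neg hcond', if_neg hcond]
      have := ih cur (acc ++ [pvCollapse g]) [cur] (by simp) rfl
      rw [pvCollapse_singleton] at this
      simpa [List.append_assoc] using this

-- ===== VERDICT (by name: the statement is the Claim_ definition above) =====
theorem merge_hyphenated_py_spec : Claim_equal_merge_hyphenated_py := by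
  intro lines _
  unfold Spec_merge_hyphenated_py
  cases lines with
  | nil => rfl
  | cons h t =>
    show pvMergeLoopA [h] t = (pvGroups h [h] t).map pvCollapse
    simpa using pvMain h t [] [h] (by simp) rfl
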